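-- pv_equiv track=rewrite | github.com/JaraVictoria/SSL | Lexer/automataSi.py | automata_si
-- ===== SOURCE A (Python) =====
-- ESTADO_FINAL = "ESTADO ACEPTADO"
--
-- ESTADO_NO_FINAL = "ESTADO NO ACEPTADO"
--
-- ESTADO_TRAMPA = "ESTADO TRAMPA"
--
-- def automata_si(cadena):
-- 	estado = 0
-- 	estados_finales = [2]
--
-- 	for caracter in cadena:
-- 		if estado == 0 and caracter == "s":
-- 			estado = 1
-- 		elif estado == 1 and caracter == "i":
-- 			estado = 2
-- 		else:
-- 			estado = -1
-- 			break
--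
-- 	if estado == -1:
-- 		return ESTADO_TRAMPA
-- 	if estado in estados_finales:
-- 		return ESTADO_FINAL
-- 	else:
-- 		return ESTADO_NO_FINAL
-- ===== SOURCE B (Python) =====
-- ESTADO_FINAL = "ESTADO ACEPTADO"
--
-- ESTADO_NO_FINAL = "ESTADO NO ACEPTADO"
--
-- ESTADO_TRAMPA = "ESTADO TRAMPA"
--
-- def automata_si(cadena):
-- 	# Closed-form classification: the DFA accepts exactly "si"; its proper
-- 	# prefixes "" and "s" end in non-final live states; everything else traps.
-- 	if cadena == "si":
-- 		return ESTADO_FINAL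
-- 	if cadena == "" or cadena == "s":
-- 		return ESTADO_NO_FINAL
-- 	return ESTADO_TRAMPA
-- ===== Notes on version B (the rewrite author's own statement) =====
-- stated objective: simpler
-- what changed: Replaces the per-character state-machine loop with a direct three-way comparison of the whole string against "si", "" and "s".
import Mathlib
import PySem

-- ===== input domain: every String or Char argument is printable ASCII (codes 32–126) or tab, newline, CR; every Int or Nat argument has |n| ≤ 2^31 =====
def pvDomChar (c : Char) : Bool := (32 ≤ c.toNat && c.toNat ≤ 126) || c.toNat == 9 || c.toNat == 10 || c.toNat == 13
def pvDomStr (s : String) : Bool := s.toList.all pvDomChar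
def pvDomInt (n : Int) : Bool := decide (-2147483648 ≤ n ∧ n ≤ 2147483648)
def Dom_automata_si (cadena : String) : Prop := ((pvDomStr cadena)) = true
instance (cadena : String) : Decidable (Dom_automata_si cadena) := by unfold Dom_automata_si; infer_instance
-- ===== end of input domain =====

-- B replaces the character-by-character DFA simulation with a direct whole-string comparison (simpler).

-- ===== PORT A =====
-- the for-loop with break: recursion over the characters, returning the state; break = return -1 at once
def automata_si_loop (estado : Int) : List Char → Int
  | [] => estado
  | c :: rest =>
    if estado = 0 ∧ c = 's' then automata_si_loop 1 rest
    else if estado = 1 ∧ c = 'i' then automata_si_loop 2 rest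
    else -1

def automata_si (cadena : String) : String :=
  let estado := automata_si_loop 0 cadena.toList
  let estados_finales : List Int := [2]
  if estado = -1 then "ESTADO TRAMPA"
  else if estados_finales.contains estado then "ESTADO ACEPTADO"
  else "ESTADO NO ACEPTADO"

-- ===== PORT B =====
def automata_si_alt (cadena : String) : String :=
  if cadena = "si" then "ESTADO ACEPTADO"
  else if cadena = "" ∨ cadena = "s" then "ESTADO NO ACEPTADO"
  else "ESTADO TRAMPA"

-- ===== PRECONDITION & SPEC =====
def Spec_automata_si (cadena : String) (out : String) : Prop := out = automata_si_alt cadena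
instance (cadena : String) (out : String) : Decidable (Spec_automata_si cadena out) := by unfold Spec_automata_si; infer_instance

-- ===== CLAIM (what is proved, stated in full; the proofs are below) =====
def Claim_equal_automata_si : Prop := ∀ (cadena : String), Dom_automata_si cadena → Spec_automata_si cadena (automata_si cadena)

-- ===== LEMMAS AND PROOFS =====

theorem string_eq_iff_toList (s t : String) : s = t ↔ s.toList = t.toList := by
  constructor
  · rintro rfl; rfl
  · intro h
    have := congrArg String.ofList h
    simpa using this

-- the classification of A's loop result, by cases on the first two characters
theorem automata_si_toList (l : List Char) :
    (if automata_si_loop 0 l = -1 then "ESTADO TRAMPA"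
     else if ([(2:Int)]).contains (automata_si_loop 0 l) then "ESTADO ACEPTADO"
     else "ESTADO NO ACEPTADO") =
    (if l = ['s','i'] then "ESTADO ACEPTADO"
     else if l = [] ∨ l = ['s'] then "ESTADO NO ACEPTADO"
     else "ESTADO TRAMPA") := by
  match l with
  | [] => rfl
  | [c] =>
    by_cases hs : c = 's' <;> simp [automata_si_loop, hs]
  | c :: d :: rest =>
    by_cases hs : c = 's' <;> by_cases hi : d = 'i' <;>
      cases rest with
      | nil => simp [automata_si_loop, hs, hi]
      | cons e rest' => simp [automata_si_loop, hs, hi]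

-- ===== VERDICT (by name: the statement is the Claim_ definition above) =====
theorem automata_si_spec : Claim_equal_automata_si := by
  intro cadena _
  unfold Spec_automata_si automata_si automata_si_alt
  simp only [string_eq_iff_toList cadena]
  have h2 : ("si" : String).toList = ['s','i'] := by decide
  have h1 : ("s" : String).toList = ['s'] := by decide
  have h0 : ("" : String).toList = [] := by decide
  rw [h2, h1, h0]
  exact automata_si_toList cadena.toList
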